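-- pv_equiv track=rewrite | github.com/shestikdan/audio_gen | scripts/text_update_agent.py | _find_text_overlap
-- ===== SOURCE A (Python) =====
-- def _find_text_overlap(text1: str, text2: str, min_overlap: int = 20) -> str:
--     """Находит перекрытие между концом первого текста и началом второго."""
--     # Ограничиваем поиск для оптимизации
--     end_of_text1 = text1[-200:] if len(text1) > 200 else text1
--     start_of_text2 = text2[:200] if len(text2) > 200 else text2
--
--     # Ищем максимальное перекрытие
--     max_overlap = ""
--     for i in range(min_overlap, len(end_of_text1) + 1):
--         suffix = end_of_text1[-i:]
--         if start_of_text2.startswith(suffix):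
--             max_overlap = suffix
--
--     return max_overlap
-- ===== SOURCE B (Python) =====
-- def _prefix_last(w):
--     """Final value of the KMP prefix function of w: the length of the
--     longest proper border (prefix that is also a suffix) of w."""
--     n = len(w)
--     pi = [0] * n
--     k = 0
--     for i in range(1, n):
--         while k > 0 and w[i] != w[k]:
--             k = pi[k - 1]
--         if w[i] == w[k]:
--             k += 1
--         pi[i] = k
--     return k
--
--
-- def _find_text_overlap(text1: str, text2: str, min_overlap: int = 20) -> str:
--     """Longest suffix of (the last 200 chars of) text1 that is a prefix of
--     (the first 200 chars of) text2, of length >= max(min_overlap, 1); else ''.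
--
--     Computed in one linear KMP prefix-function pass over
--     start + '\x00' + end: the final border length is exactly the longest
--     such overlap (the separator, absent from both texts, caps the border)."""
--     end = text1[-200:]
--     start = text2[:200]
--     t = max(min_overlap, 1)
--     L = _prefix_last(start + "\x00" + end)
--     return end[len(end) - L:] if L >= t else ""
-- ===== Notes on version B (the rewrite author's own statement) =====
-- stated objective: alternative
-- what changed: B computes the overlap with a single linear KMP prefix-function pass over start + '\x00' + end (the final border length is the longest suffix-of-end that is a prefix-of-start), instead of A's per-length loop that slices a suffix and runs startswith for every candidate overlap length.
import Mathlib
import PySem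

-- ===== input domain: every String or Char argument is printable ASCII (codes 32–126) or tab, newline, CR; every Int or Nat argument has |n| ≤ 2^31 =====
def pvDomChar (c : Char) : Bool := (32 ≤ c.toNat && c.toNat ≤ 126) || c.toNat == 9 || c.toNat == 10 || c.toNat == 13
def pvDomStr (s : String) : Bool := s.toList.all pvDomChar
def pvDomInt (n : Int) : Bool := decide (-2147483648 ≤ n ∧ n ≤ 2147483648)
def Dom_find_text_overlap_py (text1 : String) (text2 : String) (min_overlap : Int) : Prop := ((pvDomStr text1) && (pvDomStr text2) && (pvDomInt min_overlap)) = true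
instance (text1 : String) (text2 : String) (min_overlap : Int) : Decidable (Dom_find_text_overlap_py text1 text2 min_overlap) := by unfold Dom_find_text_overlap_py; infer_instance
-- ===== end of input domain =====

-- B replaces A's quadratic per-length suffix-slice + startswith scan over the 200-char windows by a
-- single linear KMP prefix-function pass over start + '\x00' + end, reading the overlap off the
-- final border length.

-- ===== PORT A =====
-- literal transliteration of A: windows, then for i in range(min_overlap, len(end)+1):
-- suffix = end[-i:]; if start.startswith(suffix): max_overlap = suffix
def find_text_overlap_py (text1 : String) (text2 : String) (min_overlap : Int) : String :=
  let t1 := text1.toList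
  let t2 := text2.toList
  let endT := if 200 < t1.length then PySem.List.slice t1 (some (-200)) none else t1
  let startT := if 200 < t2.length then PySem.List.slice t2 none (some 200) else t2
  let res := (PySem.List.pyRange min_overlap ((endT.length : Int) + 1) 1).foldl
    (fun acc i =>
      let suffix := PySem.List.slice endT (some (-i)) none
      if PySem.Chars.startswith startT suffix then suffix else acc) []
  String.ofList res

-- ===== PORT B =====
-- Source B's inner `while k > 0 and w[i] != w[k]: k = pi[k-1]` with c = w[i]; the `min … m` keeps the
-- jump below the current state, which Source B's pi (pi[j] ≤ j throughout) guarantees: a totality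
-- guard only, proved a no-op by the invariant in the lemmas below.
def kmpFall (w : List Char) (pi : List Nat) (c : Char) : Nat → Nat
  | 0 => 0
  | m + 1 => if w[m+1]? = some c then m + 1 else kmpFall w pi c (min (pi.getD m 0) m)
termination_by s => s
decreasing_by omega

-- Source B's `for i in range(1, n)` body: fall, `if w[i] == w[k]: k += 1`, `pi[i] = k`
def kmpLoop (w : List Char) (i : Nat) (pi : List Nat) (k : Nat) : Nat :=
  if h : i < w.length then
    let c := w[i]
    let k1 := kmpFall w pi c k
    let k2 := if w[k1]? = some c then k1 + 1 else k1
    kmpLoop w (i + 1) (pi.set i k2) k2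
  else k
termination_by w.length - i

-- Source B's _prefix_last: pi = [0]*n, k = 0, loop from i = 1, return k
def prefixLast (w : List Char) : Nat :=
  kmpLoop w 1 (List.replicate w.length 0) 0

def find_text_overlap_py_alt (text1 : String) (text2 : String) (min_overlap : Int) : String :=
  let e := PySem.List.slice text1.toList (some (-200)) none
  let s := PySem.List.slice text2.toList none (some 200)
  let t := max min_overlap 1
  let L := prefixLast (s ++ '\x00' :: e)
  if t ≤ (L : Int) then String.ofList (e.drop (e.length - L)) else ""

-- ===== PRECONDITION & SPEC =====
def Spec_find_text_overlap_py (text1 : String) (text2 : String) (min_overlap : Int) (out : String) : Prop := out = find_text_overlap_py_alt text1 text2 min_overlap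
instance (text1 : String) (text2 : String) (min_overlap : Int) (out : String) : Decidable (Spec_find_text_overlap_py text1 text2 min_overlap out) := by unfold Spec_find_text_overlap_py; infer_instance

-- ===== CLAIM (what is proved, stated in full; the proofs are below) =====
def Claim_equal_find_text_overlap_py : Prop := ∀ (text1 : String) (text2 : String) (min_overlap : Int), Dom_find_text_overlap_py text1 text2 min_overlap → Spec_find_text_overlap_py text1 text2 min_overlap (find_text_overlap_py text1 text2 min_overlap)

-- ===== LEMMAS AND PROOFS =====

-- "the length-L suffix of e is (as a list) the first L characters of s"
abbrev PbOv (e s : List Char) (L : Nat) : Prop := s.take L = e.drop (e.length - L)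

lemma startswith_drop_iff (e s : List Char) (L : Nat) (hL : L ≤ e.length) :
    PySem.Chars.startswith s (e.drop (e.length - L)) = true ↔ PbOv e s L := by
  rw [PySem.Chars.startswith_iff, List.prefix_iff_eq_take, List.length_drop, PbOv]
  have h : e.length - (e.length - L) = L := by omega
  rw [h, eq_comm]

lemma PbOv_le (e s : List Char) (L : Nat) (hL : L ≤ e.length) (h : PbOv e s L) : L ≤ s.length := by
  have := congrArg List.length h
  simp [List.length_take, List.length_drop] at this
  omega

lemma findGreatest_congr (P Q : Nat → Prop) [DecidablePred P] [DecidablePred Q] :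
    ∀ b, (∀ K, K ≤ b → (P K ↔ Q K)) → Nat.findGreatest P b = Nat.findGreatest Q b := by
  intro b
  induction b with
  | zero => intro _; rfl
  | succ b ih => intro h
                 rw [Nat.findGreatest_succ, Nat.findGreatest_succ,
                   ih (fun K hK => h K (by omega))]
                 by_cases hP : P (b + 1)
                 · rw [if_pos hP, if_pos ((h _ (le_refl _)).mp hP)]
                 · rw [if_neg hP, if_neg (fun hq => hP ((h _ (le_refl _)).mpr hq))]

lemma findGreatest_shrink (P : Nat → Prop) [DecidablePred P] :
    ∀ (b c : Nat), c ≤ b → (∀ K, c < K → K ≤ b → ¬ P K) →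
    Nat.findGreatest P b = Nat.findGreatest P c := by
  intro b
  induction b with
  | zero => intro c hc _; interval_cases c; rfl
  | succ b ih =>
    intro c hc h
    rcases Nat.eq_or_lt_of_le hc with rfl | hlt
    · rfl
    · rw [Nat.findGreatest_succ, if_neg (h _ hlt (Nat.le_refl _))]
      exact ih c (by omega) (fun K h1 h2 => h K h1 (by omega))

-- characterisation of A's loop: the last match of an ascending length scan is the
-- greatest matching overlap length < N
lemma foldA_spec (e s : List Char) (a : Int) (ha : 1 ≤ a) (init : List Char) :
    ∀ (N : Nat), N ≤ e.length + 1 →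
    (PySem.List.pyRange a (N : Int) 1).foldl
      (fun acc i =>
        let suffix := PySem.List.slice e (some (-i)) none
        if PySem.Chars.startswith s suffix then suffix else acc) init
    = (if Nat.findGreatest (fun L => a ≤ (L : Int) ∧ PbOv e s L) (N - 1) = 0 then init
       else e.drop (e.length - Nat.findGreatest (fun L => a ≤ (L : Int) ∧ PbOv e s L) (N - 1))) := by
  intro N
  induction N with
  | zero =>
    intro _
    rw [PySem.List.pyRange_one_eq_nil (by omega)]
    simp
  | succ M ih =>
    intro hN
    by_cases hMa : (M : Int) < a
    · rw [show (((M+1 : Nat)) : Int) = (M : Int) + 1 by push_cast; ring,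
        PySem.List.pyRange_one_eq_nil (by omega)]
      have h0 : Nat.findGreatest (fun L => a ≤ (L : Int) ∧ PbOv e s L) M = 0 := by
        rw [Nat.findGreatest_eq_zero_iff]
        intro K hK0 hKb ⟨hKa, _⟩
        have : (K : Int) ≤ (M : Int) := by exact_mod_cast Nat.cast_le.mpr (by omega)
        omega
      simp [h0]
    · rw [not_lt] at hMa
      have hM1 : 1 ≤ M := by
        have : (1:Int) ≤ (M:Int) := le_trans ha hMa
        exact_mod_cast this
      rw [show (((M+1 : Nat)) : Int) = (M : Int) + 1 by push_cast; ring,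
        PySem.List.pyRange_one_succ_right hMa, List.foldl_append]
      simp only [List.foldl_cons, List.foldl_nil]
      have hdrop : PySem.List.slice e (some (-(M:Int))) none = e.drop (e.length - M) :=
        PySem.List.slice_from_neg_natCast e M (by omega)
      have hiff : (PySem.Chars.startswith s (PySem.List.slice e (some (-(M:Int))) none) = true)
          ↔ PbOv e s M := by
        rw [hdrop]; exact startswith_drop_iff e s M (by omega)
      have hsplit : M = (M - 1) + 1 := by omega
      by_cases hg : PbOv e s M
      · rw [if_pos (hiff.mpr hg)]
        rw [show Nat.findGreatest (fun L => a ≤ (L : Int) ∧ PbOv e s L) (M + 1 - 1) = M by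
          rw [Nat.add_sub_cancel, hsplit, Nat.findGreatest_succ, ← hsplit, if_pos ⟨hMa, hg⟩]]
        rw [if_neg (by omega), hdrop]
      · rw [if_neg (fun hsw => hg (hiff.mp hsw))]
        rw [ih (by omega)]
        rw [show Nat.findGreatest (fun L => a ≤ (L : Int) ∧ PbOv e s L) (M + 1 - 1)
              = Nat.findGreatest (fun L => a ≤ (L : Int) ∧ PbOv e s L) (M - 1) by
            rw [Nat.add_sub_cancel, hsplit, Nat.findGreatest_succ, ← hsplit,
              if_neg (fun hQ => hg hQ.2)]]

-- matched suffixes in the non-positive-i part of A's range leave the accumulator empty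
lemma foldA_neg_part (e s : List Char) (l : List Int)
    (h : ∀ i ∈ l, ∀ suf, suf = PySem.List.slice e (some (-i)) none →
         PySem.Chars.startswith s suf = true → suf = []) :
    l.foldl (fun acc i =>
        let suffix := PySem.List.slice e (some (-i)) none
        if PySem.Chars.startswith s suffix then suffix else acc) [] = [] := by
  induction l with
  | nil => rfl
  | cons x xs ih =>
    simp only [List.foldl_cons]
    have hstep : (let suffix := PySem.List.slice e (some (-x)) none
        if PySem.Chars.startswith s suffix = true then suffix else ([]:List Char)) = [] := by
      by_cases hsw : PySem.Chars.startswith s (PySem.List.slice e (some (-x)) none) = true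
      · simpa [hsw] using h x (by simp) _ rfl hsw
      · simp [hsw]
    rw [hstep]
    exact ih (fun i hi => h i (List.mem_cons_of_mem _ hi))

-- A's fold reduced to the greatest matching overlap length ≤ min(len e, len s)
lemma foldA_reduce (e s : List Char) (mo : Int) :
    (PySem.List.pyRange mo ((e.length : Int) + 1) 1).foldl
      (fun acc i =>
        let suffix := PySem.List.slice e (some (-i)) none
        if PySem.Chars.startswith s suffix then suffix else acc) []
    = (if Nat.findGreatest (fun L => (max mo 1).toNat ≤ L ∧ PbOv e s L) (min e.length s.length) = 0
       then []
       else e.drop (e.length -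
         Nat.findGreatest (fun L => (max mo 1).toNat ≤ L ∧ PbOv e s L) (min e.length s.length))) := by
  have hcast : ((e.length : Int) + 1) = (((e.length + 1 : Nat)) : Int) := by push_cast; ring
  have hKey : Nat.findGreatest (fun L => (max mo 1).toNat ≤ L ∧ PbOv e s L) e.length
      = Nat.findGreatest (fun L => (max mo 1).toNat ≤ L ∧ PbOv e s L) (min e.length s.length) :=
    findGreatest_shrink _ _ _ (by omega)
      (fun K h1 h2 hQ => by have := PbOv_le e s K h2 hQ.2; omega)
  by_cases hpos : 1 ≤ mo
  · rw [hcast, foldA_spec e s mo hpos [] (e.length + 1) (by omega), Nat.add_sub_cancel]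
    rw [findGreatest_congr (fun L => mo ≤ (L:Int) ∧ PbOv e s L)
        (fun L => (max mo 1).toNat ≤ L ∧ PbOv e s L) e.length
        (fun K _ => and_congr_left (fun _ => by omega))]
    rw [hKey]
  · rw [hcast, PySem.List.pyRange_one_append mo 1 (((e.length + 1 : Nat)) : Int)
      (by omega) (by omega), List.foldl_append]
    rw [foldA_spec e s 1 le_rfl _ (e.length + 1) (by omega), Nat.add_sub_cancel]
    rw [findGreatest_congr (fun L => (1:Int) ≤ (L:Int) ∧ PbOv e s L)
        (fun L => (max mo 1).toNat ≤ L ∧ PbOv e s L) e.length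
        (fun K _ => and_congr_left (fun _ => by omega))]
    rw [hKey]
    by_cases hK : Nat.findGreatest (fun L => (max mo 1).toNat ≤ L ∧ PbOv e s L)
        (min e.length s.length) = 0
    · rw [if_pos hK, if_pos hK]
      apply foldA_neg_part
      intro i hi suf hsuf hsw
      rw [PySem.List.mem_pyRange_one] at hi
      rw [PySem.List.slice_from (xs := e) (a := -i) (by omega)] at hsuf
      by_cases hnil : suf = []
      · exact hnil
      · exfalso
        have hjj : (-i).toNat < e.length := by
          by_contra hge
          exact hnil (hsuf.trans (List.drop_eq_nil_iff.mpr (by omega)))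
        have hLe : e.length - (-i).toNat ≤ e.length := by omega
        have hdropeq : e.drop (-i).toNat
            = e.drop (e.length - (e.length - (-i).toNat)) := by congr 1; omega
        rw [hsuf, hdropeq] at hsw
        have hPb := (startswith_drop_iff e s (e.length - (-i).toNat) hLe).mp hsw
        have hLm := PbOv_le e s (e.length - (-i).toNat) hLe hPb
        have hfg := Nat.le_findGreatest (P := fun L => (max mo 1).toNat ≤ L ∧ PbOv e s L)
          (show e.length - (-i).toNat ≤ min e.length s.length by omega) ⟨by omega, hPb⟩
        omega
    · rw [if_neg hK, if_neg hK]

-- ---- border theory for the KMP side ----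

-- k is a border of u: the length-k prefix equals the length-k suffix
abbrev IsB (u : List Char) (k : Nat) : Prop := u.take k = u.drop (u.length - k)

-- length of the longest proper border of u
def lb (u : List Char) : Nat := Nat.findGreatest (fun k => IsB u k) (u.length - 1)

lemma isB_zero (u : List Char) : IsB u 0 := by simp [IsB]

lemma lb_isB (u : List Char) : IsB u (lb u) :=
  Nat.findGreatest_spec (Nat.zero_le _) (isB_zero u)

lemma lb_le (u : List Char) : lb u ≤ u.length - 1 := Nat.findGreatest_le _

lemma le_lb (u : List Char) (j : Nat) (hj : j ≤ u.length - 1) (h : IsB u j) : j ≤ lb u :=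
  Nat.le_findGreatest hj h

lemma isB_take (u : List Char) (j k : Nat) (hj : j ≤ k) (hk : k ≤ u.length)
    (hbk : IsB u k) (hbj : IsB u j) : IsB (u.take k) j := by
  have h1 : (u.take k).take j = u.take j := by rw [List.take_take]; congr 1; omega
  have hlen : (u.take k).length = k := by rw [List.length_take]; omega
  show (u.take k).take j = (u.take k).drop ((u.take k).length - j)
  rw [h1, hlen, hbk, List.drop_drop, hbj]
  congr 1
  omega

lemma isB_of_take (u : List Char) (j k : Nat) (hj : j ≤ k) (hk : k ≤ u.length)
    (hbk : IsB u k) (hbj : IsB (u.take k) j) : IsB u j := by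
  have h1 : (u.take k).take j = u.take j := by rw [List.take_take]; congr 1; omega
  have hlen : (u.take k).length = k := by rw [List.length_take]; omega
  show u.take j = u.drop (u.length - j)
  calc u.take j = (u.take k).take j := h1.symm
    _ = (u.take k).drop ((u.take k).length - j) := hbj
    _ = (u.take k).drop (k - j) := by rw [hlen]
    _ = (u.drop (u.length - k)).drop (k - j) := by rw [hbk]
    _ = u.drop (u.length - j) := by rw [List.drop_drop]; congr 1; omega

-- borders of v ++ [c] of positive length ≤ len v are borders of v extendable by c
lemma isB_concat (v : List Char) (c : Char) (k : Nat) (hk : k < v.length) :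
    IsB (v ++ [c]) (k + 1) ↔ (IsB v k ∧ v[k]? = some c) := by
  have htake : (v ++ [c]).take (k + 1) = v.take k ++ [v[k]] := by
    rw [List.take_append_of_le_length (by omega), List.take_succ,
      List.getElem?_eq_getElem hk]
    rfl
  have hlen : (v ++ [c]).length = v.length + 1 := by simp
  have hdrop : (v ++ [c]).drop ((v ++ [c]).length - (k + 1)) = v.drop (v.length - k) ++ [c] := by
    rw [hlen, show v.length + 1 - (k + 1) = v.length - k by omega,
      List.drop_append_of_le_length (by omega)]
  constructor
  · intro h
    have h2 : v.take k ++ [v[k]] = v.drop (v.length - k) ++ [c] := by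
      rw [← htake, ← hdrop]; exact h
    have hl : (v.take k).length = (v.drop (v.length - k)).length := by
      rw [List.length_take, List.length_drop]; omega
    obtain ⟨ha, hb⟩ := List.append_inj h2 (by rw [hl])
    refine ⟨ha, ?_⟩
    rw [List.getElem?_eq_getElem hk]
    have hvc : v[k] = c := by simpa using hb
    rw [hvc]
  · rintro ⟨ha, hb⟩
    show (v ++ [c]).take (k + 1) = (v ++ [c]).drop ((v ++ [c]).length - (k + 1))
    rw [htake, hdrop, ha]
    congr 1
    rw [List.getElem?_eq_getElem hk] at hb
    exact congrArg (fun x => [x]) (Option.some.inj hb)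

-- the fall loop lands on the greatest border of w.take i that extends by c (or 0)
lemma kmpFall_spec (w : List Char) (pi : List Nat) (c : Char) (i : Nat)
    (hi : i ≤ w.length)
    (hpi : ∀ j, j < i → pi.getD j 0 = lb (w.take (j + 1))) :
    ∀ s, s < i → IsB (w.take i) s →
      (kmpFall w pi c s = 0 ∨
        (IsB (w.take i) (kmpFall w pi c s) ∧ (w.take i)[kmpFall w pi c s]? = some c))
      ∧ kmpFall w pi c s ≤ s
      ∧ ∀ j, j ≤ s → IsB (w.take i) j → (w.take i)[j]? = some c → j ≤ kmpFall w pi c s := by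
  intro s
  induction s using Nat.strong_induction_on with
  | _ s ih =>
  intro hs hB
  have hulen : (w.take i).length = i := by rw [List.length_take]; omega
  match s with
  | 0 =>
    rw [kmpFall]
    exact ⟨Or.inl rfl, le_refl _, fun j hj _ _ => hj⟩
  | m + 1 =>
    rw [kmpFall]
    by_cases hc : w[m+1]? = some c
    · rw [if_pos hc]
      refine ⟨Or.inr ⟨hB, ?_⟩, le_refl _, fun j hj _ _ => hj⟩
      rw [List.getElem?_take_of_lt hs]; exact hc
    · rw [if_neg hc]
      have hpim : pi.getD m 0 = lb (w.take (m + 1)) := hpi m (by omega)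
      have hlbm : lb (w.take (m + 1)) ≤ m := by
        have := lb_le (w.take (m + 1))
        have hml : (w.take (m + 1)).length ≤ m + 1 := by
          rw [List.length_take]; omega
        omega
      have hmin : min (pi.getD m 0) m = lb (w.take (m + 1)) := by
        rw [hpim]; omega
      have htt : (w.take i).take (m + 1) = w.take (m + 1) := by
        rw [List.take_take]; congr 1; omega
      have hBs' : IsB (w.take i) (lb (w.take (m + 1))) := by
        apply isB_of_take (w.take i) _ (m + 1) (by omega) (by omega) hB
        rw [htt]
        exact lb_isB (w.take (m + 1))
      have hrec := ih (min (pi.getD m 0) m) (by omega)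
        (by rw [hmin]; omega) (by rw [hmin]; exact hBs')
      refine ⟨hrec.1, le_trans hrec.2.1 (by omega), ?_⟩
      intro j hj hjB hjc
      rcases Nat.eq_or_lt_of_le hj with rfl | hjlt
      · exfalso
        rw [List.getElem?_take_of_lt hs] at hjc
        exact hc hjc
      · have hjtake : IsB (w.take (m + 1)) j := by
          have := isB_take (w.take i) j (m + 1) (by omega) (by omega) hB hjB
          rwa [htt] at this
        have hjlb : j ≤ lb (w.take (m + 1)) := by
          apply le_lb _ _ _ hjtake
          rw [List.length_take]; omega
        exact hrec.2.2 j (by omega) hjB hjc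

-- one outer-loop step computes the longest proper border of the next prefix
lemma step_spec (w : List Char) (pi : List Nat) (i : Nat) (h1 : 1 ≤ i) (hi : i < w.length)
    (hpi : ∀ j, j < i → pi.getD j 0 = lb (w.take (j + 1))) :
    (if w[kmpFall w pi w[i] (lb (w.take i))]? = some w[i]
     then kmpFall w pi w[i] (lb (w.take i)) + 1
     else kmpFall w pi w[i] (lb (w.take i))) = lb (w.take (i + 1)) := by
  set u := w.take i with hu
  set c := w[i] with hcdef
  have hulen : u.length = i := by rw [hu, List.length_take]; omega
  have hlbu : lb u < i := by
    have h := lb_le u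
    rw [hulen] at h
    omega
  have hfall := kmpFall_spec w pi c i (by omega) hpi (lb u) hlbu (lb_isB u)
  set r := kmpFall w pi c (lb u) with hr
  obtain ⟨hP, hle, hmax⟩ := hfall
  have hrlt : r < i := by omega
  have hrB : IsB u r := by
    rcases hP with h0 | ⟨hB, _⟩
    · rw [h0]; exact isB_zero u
    · exact hB
  have htsucc : w.take (i + 1) = u ++ [c] := by
    rw [List.take_succ, List.getElem?_eq_getElem hi, hu, hcdef]
    rfl
  have hlen1 : (u ++ [c]).length - 1 = i := by simp [hulen]
  by_cases hcond : w[r]? = some c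
  · rw [if_pos hcond]
    have hcondu : u[r]? = some c := by
      rw [hu, List.getElem?_take_of_lt hrlt]; exact hcond
    rw [htsucc]
    apply le_antisymm
    · apply le_lb (u ++ [c]) (r + 1) (by omega)
      exact (isB_concat u c r (by omega)).mpr ⟨hrB, hcondu⟩
    · by_cases h0 : lb (u ++ [c]) = 0
      · omega
      · have hg := lb_isB (u ++ [c])
        have hgle : lb (u ++ [c]) ≤ i := by have := lb_le (u ++ [c]); omega
        obtain ⟨j, hj⟩ : ∃ j, lb (u ++ [c]) = j + 1 := ⟨lb (u ++ [c]) - 1, by omega⟩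
        rw [hj] at hg
        have hjlt : j < u.length := by omega
        obtain ⟨hjB, hjc⟩ := (isB_concat u c j hjlt).mp hg
        have hjlb : j ≤ lb u := le_lb u j (by omega) hjB
        have := hmax j hjlb hjB hjc
        omega
  · rw [if_neg hcond]
    have hr0 : r = 0 := by
      rcases hP with h0 | ⟨_, hrc⟩
      · exact h0
      · exfalso
        rw [List.getElem?_take_of_lt hrlt] at hrc
        exact hcond hrc
    rw [htsucc, hr0]
    symm
    rw [lb, Nat.findGreatest_eq_zero_iff]
    intro m hm0 hmle hB
    obtain ⟨j, rfl⟩ : ∃ j, m = j + 1 := ⟨m - 1, by omega⟩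
    have hjlt : j < u.length := by omega
    obtain ⟨hjB, hjc⟩ := (isB_concat u c j hjlt).mp hB
    have hjlb : j ≤ lb u := le_lb u j (by omega) hjB
    have hj0 : j = 0 := by have := hmax j hjlb hjB hjc; omega
    rw [hj0, List.getElem?_take_of_lt (by omega)] at hjc
    rw [hr0] at hcond
    exact hcond hjc

-- the outer loop maintains "pi.getD j = lb (prefix of length j+1)" and "k = lb (current prefix)"
lemma kmpLoop_spec (w : List Char) :
    ∀ (d i : Nat) (pi : List Nat) (k : Nat), w.length + 1 - i = d → 1 ≤ i →
      pi.length = w.length →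
      (∀ j, j < i → pi.getD j 0 = lb (w.take (j + 1))) →
      k = lb (w.take i) →
      kmpLoop w i pi k = lb w := by
  intro d
  induction d with
  | zero =>
    intro i pi k hd h1 hsz hpi hk
    rw [kmpLoop, dif_neg (by omega)]
    rw [hk, List.take_of_length_le (by omega)]
  | succ d ih =>
    intro i pi k hd h1 hsz hpi hk
    by_cases hlt : i < w.length
    · rw [kmpLoop, dif_pos hlt]
      have hstep := step_spec w pi i h1 hlt hpi
      rw [hk]
      apply ih (i + 1) _ _ (by omega) (by omega) (by rw [List.length_set]; exact hsz)
      · intro j hj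
        rcases Nat.lt_or_ge j i with hji | hji
        · rw [List.getD_eq_getElem?_getD, List.getElem?_set_ne (by omega),
            ← List.getD_eq_getElem?_getD]
          exact hpi j hji
        · have hj_eq : j = i := by omega
          subst hj_eq
          rw [List.getD_eq_getElem?_getD, List.getElem?_set_self (by omega)]
          exact hstep
      · exact hstep
    · rw [kmpLoop, dif_neg hlt]
      rw [hk, List.take_of_length_le (by omega)]

lemma prefixLast_eq (w : List Char) (hw : 1 ≤ w.length) : prefixLast w = lb w := by
  apply kmpLoop_spec w w.length 1 _ _ (by omega) le_rfl (by simp)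
  · intro j hj
    have hj0 : j = 0 := by omega
    subst hj0
    have : lb (w.take 1) = 0 := by
      rw [lb]
      have : (w.take 1).length - 1 = 0 := by
        have := List.length_take_le 1 w
        omega
      rw [this, Nat.findGreatest_zero]
    rw [this, List.getD_eq_getElem?_getD, List.getElem?_replicate]
    split <;> rfl
  · rw [lb]
    have : (w.take 1).length - 1 = 0 := by
      have := List.length_take_le 1 w
      omega
    rw [this, Nat.findGreatest_zero]

-- the separator caps the border of s ++ sep :: e at min(len e, len s), where it is exactly PbOv
lemma lb_sep (s e : List Char) (hs : '\x00' ∉ s) (he : '\x00' ∉ e) :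
    lb (s ++ '\x00' :: e) = Nat.findGreatest (fun L => PbOv e s L) (min e.length s.length) := by
  set w := s ++ '\x00' :: e with hw
  have hwlen : w.length = s.length + (e.length + 1) := by simp [hw]
  have hsep : w[s.length]? = some '\x00' := by
    rw [hw, List.getElem?_append_right (le_refl _), Nat.sub_self]
    rfl
  have hchar : ∀ K q, IsB w K → K ≤ w.length → q < K → w[q]? = w[w.length - K + q]? := by
    intro K q hB hK hq
    have := congrArg (fun l => l[q]?) hB
    simp only at this
    rw [List.getElem?_take_of_lt hq, List.getElem?_drop] at this
    exact this
  rw [lb]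
  rw [findGreatest_shrink _ _ (min e.length s.length) (by omega) ?noBig]
  case noBig =>
    intro K hKmin hKle hB
    rcases Nat.lt_or_ge s.length K with hKs | hKs
    · -- K > |s|: the prefix has the separator at index |s|, the suffix a char of e there
      have h := hchar K s.length hB (by omega) hKs
      rw [hsep] at h
      have hp1 : s.length + 1 ≤ w.length - K + s.length := by omega
      have hp2 : w.length - K + s.length < w.length := by omega
      have : ∃ x, w[w.length - K + s.length]? = some x ∧ x ∈ e := by
        rw [hw, List.getElem?_append_right (by omega)]
        have hidx : w.length - K + s.length - s.length = w.length - K := by omega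
        rw [hidx]
        have hlt : w.length - K - 1 < e.length := by omega
        obtain ⟨j, hj⟩ : ∃ j, w.length - K = j + 1 := ⟨w.length - K - 1, by omega⟩
        rw [hj, List.getElem?_cons_succ, List.getElem?_eq_getElem (by omega)]
        exact ⟨_, rfl, List.getElem_mem _⟩
      obtain ⟨x, hx, hxe⟩ := this
      rw [hx] at h
      exact he (Option.some.inj h ▸ hxe)
    · -- K ≤ |s| but K > |e|: the suffix has the separator where the prefix has a char of s
      have hKe : e.length < K := by omega
      have hq : K - e.length - 1 < K := by omega
      have h := hchar K (K - e.length - 1) hB (by omega) hq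
      have hidx : w.length - K + (K - e.length - 1) = s.length := by omega
      rw [hidx, hsep] at h
      have hql : K - e.length - 1 < s.length := by omega
      rw [hw, List.getElem?_append_left hql, List.getElem?_eq_getElem hql] at h
      exact hs ((Option.some.inj h).symm ▸ List.getElem_mem _)
  apply findGreatest_congr
  intro K hK
  have hKe : K ≤ e.length := by omega
  have hKs : K ≤ s.length := by omega
  have htake : w.take K = s.take K := by
    rw [hw, List.take_append_of_le_length hKs]
  have hdrop : w.drop (w.length - K) = e.drop (e.length - K) := by
    rw [hw, List.drop_append,
      List.drop_eq_nil_of_le (by simp; omega), List.nil_append,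
      show (s ++ '\x00' :: e).length - K - s.length = (e.length - K) + 1 by simp; omega,
      List.drop_succ_cons]
  show IsB w K ↔ PbOv e s K
  rw [IsB, htake, hdrop, PbOv]

theorem main_eq (text1 text2 : String) (mo : Int)
    (h1 : '\x00' ∉ text1.toList) (h2 : '\x00' ∉ text2.toList) :
    find_text_overlap_py text1 text2 mo = find_text_overlap_py_alt text1 text2 mo := by
  have hE : ∀ (l : List Char),
      (if 200 < l.length then PySem.List.slice l (some (-200)) none else l)
      = PySem.List.slice l (some (-200)) none := by
    intro l
    by_cases h : 200 < l.length
    · rw [if_pos h]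
    · rw [if_neg h, PySem.List.slice_from_neg_ofNat l 200 (by norm_num),
        show l.length - 200 = 0 by omega, List.drop_zero]
  have hS : ∀ (l : List Char),
      (if 200 < l.length then PySem.List.slice l none (some 200) else l)
      = PySem.List.slice l none (some 200) := by
    intro l
    by_cases h : 200 < l.length
    · rw [if_pos h]
    · rw [if_neg h, PySem.List.slice_to l (by norm_num),
        show ((200:Int)).toNat = 200 by rfl, List.take_of_length_le (by omega)]
  simp only [find_text_overlap_py, find_text_overlap_py_alt, hE, hS]
  set e := PySem.List.slice text1.toList (some (-200)) none with he
  set s := PySem.List.slice text2.toList none (some 200) with hs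
  have hse : '\x00' ∉ e := by
    rw [he, PySem.List.slice_from_neg_ofNat text1.toList 200 (by norm_num)]
    intro hmem
    exact h1 (List.mem_of_mem_drop hmem)
  have hss : '\x00' ∉ s := by
    rw [hs, PySem.List.slice_to text2.toList (by norm_num)]
    intro hmem
    exact h2 (List.mem_of_mem_take hmem)
  have hpl : prefixLast (s ++ '\x00' :: e)
      = Nat.findGreatest (fun L => PbOv e s L) (min e.length s.length) := by
    rw [prefixLast_eq _ (by simp; omega), lb_sep s e hss hse]
  rw [foldA_reduce, hpl]
  set M0 := Nat.findGreatest (fun L => PbOv e s L) (min e.length s.length) with hM0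
  set t := (max mo 1).toNat with ht
  have ht1 : 1 ≤ t := by omega
  have hM0le : M0 ≤ min e.length s.length := Nat.findGreatest_le _
  by_cases hge : t ≤ M0
  · -- the best border clears the threshold: A's findGreatest with threshold equals M0
    have hM0pos : 0 < M0 := by omega
    have hM0P : PbOv e s M0 := by
      have := Nat.findGreatest_spec (P := fun L => PbOv e s L)
        (Nat.zero_le (min e.length s.length)) (by simp [PbOv])
      rwa [← hM0] at this
    have hF : Nat.findGreatest (fun L => t ≤ L ∧ PbOv e s L) (min e.length s.length) = M0 := by
      apply le_antisymm
      · by_cases h0 : Nat.findGreatest (fun L => t ≤ L ∧ PbOv e s L) (min e.length s.length) = 0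
        · omega
        · obtain ⟨hle', hprop, -⟩ := Nat.findGreatest_eq_iff.mp
            (rfl : Nat.findGreatest (fun L => t ≤ L ∧ PbOv e s L) (min e.length s.length)
              = Nat.findGreatest (fun L => t ≤ L ∧ PbOv e s L) (min e.length s.length))
          exact Nat.le_findGreatest hle' (hprop h0).2
      · exact Nat.le_findGreatest hM0le ⟨hge, hM0P⟩
    rw [hF, if_neg (by omega), if_pos (by omega : max mo 1 ≤ (M0 : Int))]
  · -- no border clears the threshold: both return ""
    have hF : Nat.findGreatest (fun L => t ≤ L ∧ PbOv e s L) (min e.length s.length) = 0 := by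
      rw [Nat.findGreatest_eq_zero_iff]
      intro K hK0 hKle ⟨hKt, hKP⟩
      have : K ≤ M0 := Nat.le_findGreatest hKle hKP
      omega
    rw [hF, if_pos rfl, if_neg (by omega : ¬ max mo 1 ≤ (M0 : Int))]

-- ===== VERDICT (by name: the statement is the Claim_ definition above) =====
theorem find_text_overlap_py_spec : Claim_equal_find_text_overlap_py := by
  intro text1 text2 min_overlap hdom
  have hd : pvDomStr text1 = true ∧ pvDomStr text2 = true := by
    unfold Dom_find_text_overlap_py at hdom
    simp [Bool.and_eq_true] at hdom
    exact ⟨hdom.1.1, hdom.1.2⟩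
  have hz : ∀ (str : String), pvDomStr str = true → '\x00' ∉ str.toList := by
    intro str hstr hmem
    have := (List.all_eq_true.mp hstr) _ hmem
    simp [pvDomChar] at this
  exact main_eq text1 text2 min_overlap (hz _ hd.1) (hz _ hd.2)
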